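-- pv_equiv track=rewrite | github.com/kunal0011/myWorksSpace | python/src/Amazon/852peakindexinmountainArray.py | validate_mountain_array
-- ===== SOURCE A (Python) =====
-- from typing import List
--
-- def validate_mountain_array(arr: List[int]) -> bool:
--     """Validate if array is a mountain array and meets constraints"""
--     if not 3 <= len(arr) <= 10**5:
--         return False
--     if not all(0 <= x <= 10**6 for x in arr):
--         return False
--
--     # Check if it's actually a mountain
--     peak = max(range(1, len(arr)-1), key=lambda i: arr[i])
--     return all(arr[i-1] < arr[i] for i in range(1, peak+1)) and \
--            all(arr[i] > arr[i+1] for i in range(peak, len(arr)-1))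
-- ===== SOURCE B (Python) =====
-- from typing import List
--
-- def validate_mountain_array(arr: List[int]) -> bool:
--     """Validate if array is a mountain array and meets constraints"""
--     n = len(arr)
--     if not 3 <= n <= 10**5:
--         return False
--     if not all(0 <= x <= 10**6 for x in arr):
--         return False
--     i = 0
--     while i + 1 < n and arr[i] < arr[i + 1]:
--         i += 1
--     if i == 0 or i == n - 1:
--         return False
--     while i + 1 < n and arr[i] > arr[i + 1]:
--         i += 1
--     return i == n - 1
-- ===== Notes on version B (the rewrite author's own statement) =====
-- stated objective: alternative
-- what changed: Replaced the interior argmax scan plus two all-scans with a single two-pointer forward walk (climb strictly up, then strictly down); same guards, same results.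
import Mathlib
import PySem

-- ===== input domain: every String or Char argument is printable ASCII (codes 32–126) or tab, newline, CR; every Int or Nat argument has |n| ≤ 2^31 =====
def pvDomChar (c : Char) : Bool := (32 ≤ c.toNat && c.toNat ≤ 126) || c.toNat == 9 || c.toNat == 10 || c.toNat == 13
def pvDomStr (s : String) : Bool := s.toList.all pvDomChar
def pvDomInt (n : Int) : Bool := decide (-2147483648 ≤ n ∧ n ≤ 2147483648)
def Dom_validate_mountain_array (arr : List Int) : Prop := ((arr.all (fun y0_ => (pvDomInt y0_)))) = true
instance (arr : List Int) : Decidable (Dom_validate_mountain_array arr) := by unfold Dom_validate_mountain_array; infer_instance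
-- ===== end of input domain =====

-- B replaces A's interior-argmax scan plus two all-scans by a single two-pointer
-- forward walk (climb strictly up, then strictly down); same guards, same results.

-- ===== PORT A =====
-- peak = max(range(1, len(arr)-1), key=lambda i: arr[i]); the match's none branch is
-- unreachable under the length guard (Python's max would raise on an empty range).
-- arr[i] is ported as pyGetD (exact here: every index used lies in range).
def validate_mountain_array (arr : List Int) : Bool :=
  if ¬ (3 ≤ arr.length ∧ arr.length ≤ 10^5) then false
  else if ¬ (arr.all fun x => decide (0 ≤ x ∧ x ≤ 10^6)) then false
  else
    match PySem.List.max? (PySem.List.pyRange 1 ((arr.length : Int) - 1) 1)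
        (fun i => PySem.List.pyGetD arr i 0) with
    | none => false
    | some peak =>
      ((PySem.List.pyRange 1 (peak + 1) 1).all fun i =>
          decide (PySem.List.pyGetD arr (i - 1) 0 < PySem.List.pyGetD arr i 0)) &&
      ((PySem.List.pyRange peak ((arr.length : Int) - 1) 1).all fun i =>
          decide (PySem.List.pyGetD arr (i + 1) 0 < PySem.List.pyGetD arr i 0))

-- ===== PORT B =====
-- while i+1 < n and arr[i] < arr[i+1]: i += 1   (i is a nonnegative index, so
-- arr[i] is List.getD; exact since every index used lies in range)
def pvClimbUp (arr : List Int) (i : Nat) : Nat :=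
  if h : i + 1 < arr.length ∧ arr.getD i 0 < arr.getD (i + 1) 0 then
    pvClimbUp arr (i + 1)
  else i
termination_by arr.length - i
decreasing_by omega

-- while i+1 < n and arr[i] > arr[i+1]: i += 1
def pvClimbDown (arr : List Int) (i : Nat) : Nat :=
  if h : i + 1 < arr.length ∧ arr.getD (i + 1) 0 < arr.getD i 0 then
    pvClimbDown arr (i + 1)
  else i
termination_by arr.length - i
decreasing_by omega

def validate_mountain_array_alt (arr : List Int) : Bool :=
  if ¬ (3 ≤ arr.length ∧ arr.length ≤ 10^5) then false
  else if ¬ (arr.all fun x => decide (0 ≤ x ∧ x ≤ 10^6)) then false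
  else
    let i := pvClimbUp arr 0
    if i = 0 ∨ i = arr.length - 1 then false
    else decide (pvClimbDown arr i = arr.length - 1)

-- ===== PRECONDITION & SPEC =====
def Spec_validate_mountain_array (arr : List Int) (out : Bool) : Prop := out = validate_mountain_array_alt arr
instance (arr : List Int) (out : Bool) : Decidable (Spec_validate_mountain_array arr out) := by unfold Spec_validate_mountain_array; infer_instance

-- ===== CLAIM (what is proved, stated in full; the proofs are below) =====
def Claim_equal_validate_mountain_array : Prop := ∀ (arr : List Int), Dom_validate_mountain_array arr → Spec_validate_mountain_array arr (validate_mountain_array arr)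

-- ===== LEMMAS AND PROOFS =====

-- strictly increasing on indices 0..p, strictly decreasing on p..n-1
def IncTo (arr : List Int) (p : Nat) : Prop :=
  ∀ k : Nat, k < p → arr.getD k 0 < arr.getD (k + 1) 0
def DecFrom (arr : List Int) (p : Nat) : Prop :=
  ∀ k : Nat, p ≤ k → k + 1 < arr.length → arr.getD (k + 1) 0 < arr.getD k 0
def Mtn (arr : List Int) : Prop :=
  ∃ p : Nat, 0 < p ∧ p + 1 < arr.length ∧ IncTo arr p ∧ DecFrom arr p

lemma climbUp_lt (arr : List Int) (i : Nat) (h : i < arr.length) :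
    pvClimbUp arr i < arr.length := by
  fun_induction pvClimbUp arr i with
  | case1 i h ih => exact ih (by omega)
  | case2 i hstop => exact h

lemma climbUp_chain (arr : List Int) (i : Nat) :
    ∀ k : Nat, i ≤ k → k < pvClimbUp arr i → arr.getD k 0 < arr.getD (k + 1) 0 := by
  fun_induction pvClimbUp arr i with
  | case1 i h ih =>
    intro k hik hk
    rcases Nat.eq_or_lt_of_le hik with rfl | hlt
    · exact h.2
    · exact ih k hlt hk
  | case2 i hstop => intro k hik hk; omega

lemma climbUp_eq (arr : List Int) (i q : Nat) (hq : q < arr.length) (hiq : i ≤ q)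
    (hchain : ∀ k : Nat, i ≤ k → k < q → arr.getD k 0 < arr.getD (k + 1) 0)
    (hstop : ¬ (q + 1 < arr.length ∧ arr.getD q 0 < arr.getD (q + 1) 0)) :
    pvClimbUp arr i = q := by
  fun_induction pvClimbUp arr i with
  | case1 i h ih =>
    rcases Nat.eq_or_lt_of_le hiq with rfl | hlt
    · exact absurd h hstop
    · exact ih (by omega) (fun k hk => hchain k (by omega))
  | case2 i h =>
    rcases Nat.eq_or_lt_of_le hiq with rfl | hlt
    · rfl
    · exact absurd ⟨by omega, hchain i le_rfl hlt⟩ h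
      

lemma climbDown_chain (arr : List Int) (i : Nat) :
    ∀ k : Nat, i ≤ k → k < pvClimbDown arr i → arr.getD (k + 1) 0 < arr.getD k 0 := by
  fun_induction pvClimbDown arr i with
  | case1 i h ih =>
    intro k hik hk
    rcases Nat.eq_or_lt_of_le hik with rfl | hlt
    · exact h.2
    · exact ih k hlt hk
  | case2 i hstop => intro k hik hk; omega

lemma climbDown_eq (arr : List Int) (i q : Nat) (hq : q < arr.length) (hiq : i ≤ q)
    (hchain : ∀ k : Nat, i ≤ k → k < q → arr.getD (k + 1) 0 < arr.getD k 0)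
    (hstop : ¬ (q + 1 < arr.length ∧ arr.getD (q + 1) 0 < arr.getD q 0)) :
    pvClimbDown arr i = q := by
  fun_induction pvClimbDown arr i with
  | case1 i h ih =>
    rcases Nat.eq_or_lt_of_le hiq with rfl | hlt
    · exact absurd h hstop
    · exact ih (by omega) (fun k hk => hchain k (by omega))
  | case2 i h =>
    rcases Nat.eq_or_lt_of_le hiq with rfl | hlt
    · rfl
    · exact absurd ⟨by omega, hchain i le_rfl hlt⟩ h
      

-- monotone consequences of the chains
lemma incTo_mono (arr : List Int) (p : Nat) (h : IncTo arr p) :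
    ∀ a b : Nat, a < b → b ≤ p → arr.getD a 0 < arr.getD b 0 := by
  intro a b hab hbp
  induction b with
  | zero => omega
  | succ b ih =>
    rcases Nat.eq_or_lt_of_le (Nat.lt_succ_iff.mp hab) with rfl | hlt
    · exact h a (by omega)
    · exact lt_trans (ih hlt (by omega)) (h b (by omega))

lemma decFrom_mono (arr : List Int) (p : Nat) (h : DecFrom arr p) :
    ∀ a b : Nat, p ≤ a → a < b → b < arr.length → arr.getD b 0 < arr.getD a 0 := by
  intro a b hpa hab hb
  induction b with
  | zero => omega
  | succ b ih =>
    rcases Nat.eq_or_lt_of_le (Nat.lt_succ_iff.mp hab) with rfl | hlt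
    · exact h a hpa (by omega)
    · exact lt_trans (h b (by omega) (by omega)) (ih hlt (by omega))

lemma B_iff (arr : List Int) (hn : 3 ≤ arr.length ∧ arr.length ≤ 10^5)
    (hr : arr.all fun x => decide (0 ≤ x ∧ x ≤ 10^6)) :
    validate_mountain_array_alt arr = true ↔ Mtn arr := by
  have hlen : 0 < arr.length := by omega
  have hup : ∀ p : Nat, 0 < p → p + 1 < arr.length → IncTo arr p → DecFrom arr p →
      pvClimbUp arr 0 = p := by
    intro p hp0 hpn hinc hdec
    refine climbUp_eq arr 0 p (by omega) (by omega) (fun k _ hk => hinc k hk) ?_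
    rintro ⟨h1, h2⟩
    exact absurd h2 (not_lt.mpr (le_of_lt (hdec p le_rfl h1)))
  unfold validate_mountain_array_alt
  rw [if_neg (not_not_intro hn), if_neg (not_not_intro hr)]
  by_cases h0 : pvClimbUp arr 0 = 0 ∨ pvClimbUp arr 0 = arr.length - 1
  · simp only [if_pos h0]
    constructor
    · intro habs; cases habs
    · rintro ⟨p, hp0, hpn, hinc, hdec⟩
      have := hup p hp0 hpn hinc hdec
      omega
  · simp only [if_neg h0, decide_eq_true_iff]
    constructor
    · intro hd
      have hjlt : pvClimbUp arr 0 < arr.length := climbUp_lt arr 0 hlen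
      refine ⟨pvClimbUp arr 0, by omega, by omega, ?_, ?_⟩
      · exact fun k hk => climbUp_chain arr 0 k (Nat.zero_le k) hk
      · intro k hjk hk1
        exact climbDown_chain arr (pvClimbUp arr 0) k hjk (by omega)
    · rintro ⟨p, hp0, hpn, hinc, hdec⟩
      rw [hup p hp0 hpn hinc hdec]
      refine climbDown_eq arr p (arr.length - 1) (by omega) (by omega) ?_ ?_
      · intro k hpk hk
        exact hdec k hpk (by omega)
      · rintro ⟨h1, _⟩
        omega

lemma A_iff (arr : List Int) (hn : 3 ≤ arr.length ∧ arr.length ≤ 10^5)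
    (hr : arr.all fun x => decide (0 ≤ x ∧ x ≤ 10^6)) :
    validate_mountain_array arr = true ↔ Mtn arr := by
  unfold validate_mountain_array
  rw [if_neg (not_not_intro hn), if_neg (not_not_intro hr)]
  obtain ⟨peak, hpk⟩ : ∃ p, PySem.List.max? (PySem.List.pyRange 1 ((arr.length : Int) - 1) 1)
      (fun i => PySem.List.pyGetD arr i 0) = some p := by
    rcases h : PySem.List.max? (PySem.List.pyRange 1 ((arr.length : Int) - 1) 1)
        (fun i => PySem.List.pyGetD arr i 0) with _ | p
    · rw [PySem.List.max?_eq_none_iff] at h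
      have h1 : (1 : Int) ∈ PySem.List.pyRange 1 ((arr.length : Int) - 1) 1 :=
        PySem.List.mem_pyRange_one.mpr ⟨le_rfl, by omega⟩
      rw [h] at h1
      cases h1
    · exact ⟨p, rfl⟩
  rw [hpk]
  have hmem := PySem.List.max?_mem hpk
  have hbounds := PySem.List.mem_pyRange_one.mp hmem
  have hmax := PySem.List.max?_isMax hpk
  have hPc : ((peak.toNat : Int)) = peak := Int.toNat_of_nonneg (by omega)
  have hP1 : 1 ≤ peak.toNat := by omega
  have hPn : peak.toNat + 1 < arr.length := by omega
  have C1 : (∀ i ∈ PySem.List.pyRange 1 (peak + 1) 1,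
      PySem.List.pyGetD arr (i - 1) 0 < PySem.List.pyGetD arr i 0) ↔ IncTo arr peak.toNat := by
    constructor
    · intro hall k hk
      have h1 : ((k : Int) + 1) ∈ PySem.List.pyRange 1 (peak + 1) 1 :=
        PySem.List.mem_pyRange_one.mpr ⟨by omega, by omega⟩
      have h2 := hall _ h1
      have e1 : ((k : Int) + 1) - 1 = ((k : Nat) : Int) := by omega
      have e2 : ((k : Int) + 1) = (((k + 1 : Nat)) : Int) := by omega
      rw [e1, e2, PySem.List.pyGetD_natCast, PySem.List.pyGetD_natCast] at h2
      exact h2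
    · intro hinc i hi
      rw [PySem.List.mem_pyRange_one] at hi
      obtain ⟨m, rfl⟩ : ∃ m : Nat, ((m : Int) + 1) = i := ⟨(i - 1).toNat, by omega⟩
      have h2 := hinc m (by omega)
      have e1 : ((m : Int) + 1) - 1 = ((m : Nat) : Int) := by omega
      have e2 : ((m : Int) + 1) = (((m + 1 : Nat)) : Int) := by omega
      rw [e1, e2, PySem.List.pyGetD_natCast, PySem.List.pyGetD_natCast]
      exact h2
  have C2 : (∀ i ∈ PySem.List.pyRange peak ((arr.length : Int) - 1) 1,
      PySem.List.pyGetD arr (i + 1) 0 < PySem.List.pyGetD arr i 0) ↔ DecFrom arr peak.toNat := by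
    constructor
    · intro hall k hk hk1
      have h1 : ((k : Int)) ∈ PySem.List.pyRange peak ((arr.length : Int) - 1) 1 :=
        PySem.List.mem_pyRange_one.mpr ⟨by omega, by omega⟩
      have h2 := hall _ h1
      have e2 : ((k : Int) + 1) = (((k + 1 : Nat)) : Int) := by omega
      rw [e2, PySem.List.pyGetD_natCast, PySem.List.pyGetD_natCast] at h2
      exact h2
    · intro hdec i hi
      rw [PySem.List.mem_pyRange_one] at hi
      obtain ⟨m, rfl⟩ : ∃ m : Nat, ((m : Int)) = i := ⟨i.toNat, by omega⟩
      have h2 := hdec m (by omega) (by omega)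
      have e2 : ((m : Int) + 1) = (((m + 1 : Nat)) : Int) := by omega
      rw [e2, PySem.List.pyGetD_natCast, PySem.List.pyGetD_natCast]
      exact h2
  simp only [Bool.and_eq_true, List.all_eq_true, decide_eq_true_iff]
  constructor
  · rintro ⟨h1, h2⟩
    exact ⟨peak.toNat, by omega, hPn, C1.mp h1, C2.mp h2⟩
  · rintro ⟨p, hp0, hpn, hinc, hdec⟩
    have hgp : arr.getD p 0 ≤ arr.getD peak.toNat 0 := by
      have h3 := hmax ((p : Nat) : Int) (PySem.List.mem_pyRange_one.mpr ⟨by omega, by omega⟩)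
      rw [← hPc, PySem.List.pyGetD_natCast, PySem.List.pyGetD_natCast] at h3
      exact h3
    have hPp : peak.toNat = p := by
      by_contra hne2
      rcases Nat.lt_or_ge peak.toNat p with h | h
      · exact absurd (incTo_mono arr p hinc peak.toNat p h le_rfl) (not_lt.mpr hgp)
      · exact absurd (decFrom_mono arr p hdec p peak.toNat (le_refl p) (by omega) (by omega))
          (not_lt.mpr hgp)
    rw [hPp] at C1 C2
    exact ⟨C1.mpr hinc, C2.mpr hdec⟩

lemma A_false_len (arr : List Int) (hn : ¬ (3 ≤ arr.length ∧ arr.length ≤ 10^5)) :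
    validate_mountain_array arr = false := by
  unfold validate_mountain_array; rw [if_pos hn]

lemma B_false_len (arr : List Int) (hn : ¬ (3 ≤ arr.length ∧ arr.length ≤ 10^5)) :
    validate_mountain_array_alt arr = false := by
  unfold validate_mountain_array_alt; rw [if_pos hn]

lemma A_false_range (arr : List Int) (hn : 3 ≤ arr.length ∧ arr.length ≤ 10^5)
    (hr : ¬ (arr.all fun x => decide (0 ≤ x ∧ x ≤ 10^6)) = true) :
    validate_mountain_array arr = false := by
  unfold validate_mountain_array; rw [if_neg (not_not_intro hn), if_pos hr]

lemma B_false_range (arr : List Int) (hn : 3 ≤ arr.length ∧ arr.length ≤ 10^5)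
    (hr : ¬ (arr.all fun x => decide (0 ≤ x ∧ x ≤ 10^6)) = true) :
    validate_mountain_array_alt arr = false := by
  unfold validate_mountain_array_alt; rw [if_neg (not_not_intro hn), if_pos hr]

-- ===== VERDICT (by name: the statement is the Claim_ definition above) =====
theorem validate_mountain_array_spec : Claim_equal_validate_mountain_array := by
  intro arr _
  unfold Spec_validate_mountain_array
  by_cases hn : 3 ≤ arr.length ∧ arr.length ≤ 10^5
  · by_cases hr : (arr.all fun x => decide (0 ≤ x ∧ x ≤ 10^6)) = true
    · rw [Bool.eq_iff_iff, A_iff arr hn hr, B_iff arr hn hr]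
    · rw [A_false_range arr hn hr, B_false_range arr hn hr]
  · rw [A_false_len arr hn, B_false_len arr hn]
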